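-- pv_equiv track=rewrite | github.com/bssrdf/pyleet | C/ConstructTargetArrayWithMultipleSums.py | isPossible2
-- ===== SOURCE A (Python) =====
-- import heapq
--
-- def isPossible2(target):
--     """
--     :type target: List[int]
--     :rtype: bool
--     """
--     # 100%
--     A = target
--     total = sum(A)
--     A = [-a for a in A]
--     heapq.heapify(A)
--     while total > 1 and -A[0] > total//2:
--         a = -heapq.heappop(A)
--         total -= a
--         if total <= 1:
--             return True if total == 1 else False
--         a %= total
--         total += a
--         heapq.heappush(A, -a)
--     return total == len(A)
-- ===== SOURCE B (Python) =====
-- def _insert_desc(x, l):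
--     """Insert x into descending-sorted list l, keeping it descending-sorted."""
--     i = 0
--     while i < len(l) and l[i] >= x:
--         i += 1
--     return l[:i] + [x] + l[i:]
--
--
-- def isPossible2(target):
--     """
--     :type target: List[int]
--     :rtype: bool
--     """
--     # Sort once (descending) and keep the list sorted by insertion; the current
--     # maximum is the head.  Same modulo/total logic as the heap version, and
--     # the guard 'max > total//2' is replaced by the equivalent '2*max > total'.
--     # target is not mutated.
--     s = sorted(target, reverse=True)
--     total = sum(s)
--     while total > 1 and 2 * s[0] > total:
--         mv = s[0]
--         rest = s[1:]
--         total -= mv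
--         if total <= 1:
--             return total == 1
--         mv %= total
--         total += mv
--         s = _insert_desc(mv, rest)
--     return total == len(s)
-- ===== Notes on version B (the rewrite author's own statement) =====
-- stated objective: alternative
-- what changed: Replaces the negated min-heap with a descending-sorted list built by one initial sort and maintained by ordered insertion (head = current maximum), and replaces the 'max > total//2' guard by the equivalent integer inequality '2*max > total'; same modulo/total logic, no heapq and no negation trick.
import Mathlib
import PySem

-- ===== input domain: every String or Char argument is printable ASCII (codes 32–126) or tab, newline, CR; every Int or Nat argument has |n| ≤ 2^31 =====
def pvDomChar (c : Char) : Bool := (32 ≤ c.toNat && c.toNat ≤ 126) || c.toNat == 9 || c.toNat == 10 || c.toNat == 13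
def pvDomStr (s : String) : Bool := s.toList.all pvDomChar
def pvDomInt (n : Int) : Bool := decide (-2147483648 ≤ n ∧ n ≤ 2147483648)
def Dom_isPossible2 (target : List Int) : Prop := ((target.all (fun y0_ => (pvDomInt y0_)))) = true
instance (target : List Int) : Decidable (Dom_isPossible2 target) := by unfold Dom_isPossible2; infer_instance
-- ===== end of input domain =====

-- B replaces A's negated min-heap with a descending-sorted list (one initial sort,
-- maintained by ordered insertion; head = current maximum) and the guard
-- 'max > total//2' with the equivalent '2*max > total' (alternative, same cost class);
-- neither program mutates its argument (A mutates only a local copy).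

-- ===== PORT A =====
-- heapq is modelled value-faithfully: the heapified list is a bag whose root A[0] is
-- its minimum, heappop removes one occurrence of the minimum, heappush adds an
-- element; the heap's internal layout never influences A's observable result.
-- fuel = total.toNat + 1 suffices: total strictly decreases across each iteration
-- and the loop only continues while total > 1, so the 0-fuel branch is unreachable.
def loopA (fuel : Nat) (total : Int) (H : List Int) : Bool :=
  match fuel with
  | 0 => false
  | fuel + 1 =>
    match PySem.List.min? H (fun x => x) with
    | none => decide (total = (H.length : Int))  -- empty heap forces total = 0, so the
                                                 -- Python guard short-circuits (A[0] untouched)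
    | some m =>
      if total > 1 ∧ -m > PySem.Int.floordiv total 2 then
        let a := -m
        let H' := H.erase m                      -- a = -heapq.heappop(A)
        let total' := total - a
        if total' ≤ 1 then decide (total' = 1)   -- return True if total == 1 else False
        else
          let a2 := PySem.Int.mod a total'
          loopA fuel (total' + a2) ((-a2) :: H') -- heapq.heappush(A, -a)
      else decide (total = (H.length : Int))

def isPossible2 (target : List Int) : Bool :=
  let total := target.sum
  loopA (total.toNat + 1) total (target.map (fun a => -a))

-- ===== PORT B =====
-- _insert_desc(x, l): insert x into the descending-sorted list l (structural
-- recursion computing exactly Source B's scan-then-splice insertion).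
def insertDesc (x : Int) (l : List Int) : List Int :=
  match l with
  | [] => [x]
  | y :: ys => if y ≥ x then y :: insertDesc x ys else x :: y :: ys

def loopB (fuel : Nat) (total : Int) (s : List Int) : Bool :=
  match fuel with
  | 0 => false
  | fuel + 1 =>
    if total > 1 then
      match s with
      | [] => decide (total = 0)     -- unreachable: total = sum s, so total > 1 needs s ≠ []
      | mv :: rest =>
        if 2 * mv > total then
          let total' := total - mv
          if total' ≤ 1 then decide (total' = 1)
          else
            let a := PySem.Int.mod mv total'
            loopB fuel (total' + a) (insertDesc a rest)
        else decide (total = (s.length : Int))   -- loop guard fails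
    else decide (total = (s.length : Int))

def isPossible2_alt (target : List Int) : Bool :=
  let s := PySem.List.sorted target (fun x => x) true
  let total := target.sum
  loopB (total.toNat + 1) total s

-- ===== PRECONDITION & SPEC =====
def Spec_isPossible2 (target : List Int) (out : Bool) : Prop := out = isPossible2_alt target
instance (target : List Int) (out : Bool) : Decidable (Spec_isPossible2 target out) := by unfold Spec_isPossible2; infer_instance

-- ===== CLAIM (what is proved, stated in full; the proofs are below) =====
def Claim_equal_isPossible2 : Prop := ∀ (target : List Int), Dom_isPossible2 target → Spec_isPossible2 target (isPossible2 target)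

-- ===== LEMMAS AND PROOFS =====

-- On Int lists the value returned by min? is THE minimum, so it is characterised
-- (and hence permutation-invariant) by membership + extremality.
lemma min?_id_iff (l : List Int) (m : Int) :
    PySem.List.min? l (fun x => x) = some m ↔ m ∈ l ∧ ∀ y ∈ l, m ≤ y := by
  constructor
  · intro h
    exact ⟨PySem.List.min?_mem h, fun y hy => PySem.List.min?_isMin h y hy⟩
  · rintro ⟨hm, hmin⟩
    cases hm' : PySem.List.min? l (fun x => x) with
    | none =>
      rw [PySem.List.min?_eq_none_iff] at hm'
      simp [hm'] at hm
    | some m' =>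
      have h1 : m' ∈ l := PySem.List.min?_mem hm'
      have h2 : (fun x : Int => x) m' ≤ (fun x : Int => x) m := PySem.List.min?_isMin hm' m hm
      have h3 : m ≤ m' := hmin m' h1
      rw [show m = m' from le_antisymm h3 h2]

-- Python's 'mv > total//2' is exactly '2*mv > total' on integers.
lemma floordiv2_iff (t mv : Int) : mv > PySem.Int.floordiv t 2 ↔ 2 * mv > t := by
  unfold PySem.Int.floordiv
  rw [Int.fdiv_eq_ediv]
  simp only [show (0:Int) ≤ 2 by norm_num, true_or, if_true]
  omega

lemma insertDesc_perm (x : Int) (l : List Int) : (insertDesc x l).Perm (x :: l) := by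
  induction l with
  | nil => simp [insertDesc]
  | cons y ys ih =>
    unfold insertDesc
    split_ifs with h
    · exact ((ih.cons y).trans (List.Perm.swap x y ys))
    · rfl

lemma insertDesc_pairwise (x : Int) (l : List Int) (h : l.Pairwise (· ≥ ·)) :
    (insertDesc x l).Pairwise (· ≥ ·) := by
  induction l with
  | nil => simp [insertDesc]
  | cons y ys ih =>
    rw [List.pairwise_cons] at h
    unfold insertDesc
    split_ifs with hyx
    · rw [List.pairwise_cons]
      refine ⟨fun a ha => ?_, ih h.2⟩
      rcases List.mem_cons.mp ((insertDesc_perm x ys).mem_iff.mp ha) with h' | h'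
      · omega
      · exact h.1 a h'
    · rw [List.pairwise_cons]
      exact ⟨fun a ha => by
        rcases List.mem_cons.mp ha with h' | h'
        · omega
        · have := h.1 a h'
          omega, List.pairwise_cons.mpr h⟩

-- The heap-bag / sorted-list simulation: if the negations of the heap form (as a
-- bag) the descending-sorted list s, the two loops return the same Boolean.
lemma loop_eq (fuel : Nat) : ∀ (total : Int) (H s : List Int),
    (H.map (fun x => -x)).Perm s → s.Pairwise (· ≥ ·) →
    loopA fuel total H = loopB fuel total s := by
  induction fuel with
  | zero => intro total H s _ _; simp [loopA, loopB]
  | succ n ih =>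
    intro total H s p hs
    have hlen : (H.length : Int) = (s.length : Int) := by
      have := p.length_eq
      simp only [List.length_map] at this
      exact_mod_cast this
    cases s with
    | nil =>
      have hH : H = [] := by
        have := p.eq_nil
        simpa using this
      subst hH
      have hmin : PySem.List.min? ([] : List Int) (fun x => x) = none :=
        (PySem.List.min?_eq_none_iff _ _).mpr rfl
      simp [loopA, loopB, hmin]
    | cons mv rest =>
      have hmem : mv ∈ mv :: rest := List.mem_cons_self
      have hmax : ∀ y ∈ mv :: rest, y ≤ mv := by
        intro y hy
        rcases List.mem_cons.mp hy with hy | hy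
        · omega
        · exact (List.pairwise_cons.mp hs).1 y hy
      have hmvH : -mv ∈ H := by
        have : mv ∈ H.map (fun x => -x) := p.mem_iff.mpr hmem
        obtain ⟨x, hx, hxe⟩ := List.mem_map.mp this
        have : x = -mv := by omega
        simpa [this] using hx
      have hmin : PySem.List.min? H (fun x => x) = some (-mv) := by
        rw [min?_id_iff]
        refine ⟨hmvH, fun y hy => ?_⟩
        have : -y ∈ mv :: rest := p.mem_iff.mp (List.mem_map.mpr ⟨y, hy, rfl⟩)
        have := hmax _ this
        omega
      simp only [loopA, loopB, hmin, neg_neg]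
      by_cases h1 : total > 1
      · by_cases h2 : 2 * mv > total
        · have h2' : mv > PySem.Int.floordiv total 2 := (floordiv2_iff total mv).mpr h2
          rw [if_pos (And.intro h1 h2'), if_pos h1, if_pos h2]
          by_cases h3 : total - mv ≤ 1
          · rw [if_pos h3, if_pos h3]
          · rw [if_neg h3, if_neg h3]
            apply ih
            · have hperm : ((H.erase (-mv)).map (fun x => -x)).Perm rest := by
                have hme : (H.erase (-mv)).map (fun x => -x)
                    = (H.map (fun x => -x)).erase mv := by
                  have := List.map_erase (f := fun x : Int => -x)
                    (fun a b h => by dsimp at h; omega) (a := -mv) (l := H)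
                  simpa using this
                rw [hme]
                have := p.erase mv
                simpa using this
              have hcons : ((-PySem.Int.mod mv (total - mv)) :: H.erase (-mv)).map
                    (fun x => -x)
                  = PySem.Int.mod mv (total - mv) :: (H.erase (-mv)).map (fun x => -x) := by
                simp
              rw [hcons]
              exact (hperm.cons _).trans (insertDesc_perm _ _).symm
            · exact insertDesc_pairwise _ _ (List.pairwise_cons.mp hs).2
        · have h2' : ¬ (-(-mv) > PySem.Int.floordiv total 2) := by
            rw [neg_neg]
            intro h; exact h2 ((floordiv2_iff total mv).mp h)
          rw [if_neg (by intro h; exact h2' (by simpa using h.2)), if_pos h1, if_neg h2, hlen]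
      · rw [if_neg (by intro h; exact h1 h.1), if_neg h1, hlen]

-- ===== VERDICT (by name: the statement is the Claim_ definition above) =====
theorem isPossible2_spec : Claim_equal_isPossible2 := by
  intro target _
  unfold Spec_isPossible2 isPossible2 isPossible2_alt
  apply loop_eq
  · have hperm : (PySem.List.sorted target (fun x => x) true).Perm target :=
      PySem.List.sorted_perm target (fun x => x) true
    have : (target.map (fun a => -a)).map (fun x => -x) = target := by
      simp [List.map_map]
    rw [this]
    exact hperm.symm
  · have := PySem.List.sorted_pairwise_rev (xs := target) (key := fun x : Int => x)
    simpa using this
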